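-- pv_equiv track=rewrite | github.com/rubelw/OSSS | src/OSSS/ai/agents/query_data/handlers/assignment_categories_handler.py | _select_assignment_categories_fields
-- ===== SOURCE A (Python) =====
-- from typing import Any, Dict, List, Sequence
--
-- def _select_assignment_categories_fields(
--     rows: Sequence[Dict[str, Any]],
-- ) -> List[str]:
--     if not rows:
--         return []
--
--     preferred_order = [
--         "id",
--         "category_code",
--         "name",
--         "short_name",
--         "description",
--         "grading_scale_id",
--         "grading_scale_name",
--         "weight",
--         "drop_lowest_count",
--         "is_default",
--         "is_active",
--         "school_id",
--         "school_name",
--         "created_at",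
--         "updated_at",
--     ]
--
--     all_keys: List[str] = []
--     for r in rows:
--         for k in r:
--             if k not in all_keys:
--                 all_keys.append(k)
--
--     ordered = [k for k in preferred_order if k in all_keys]
--     ordered.extend(k for k in all_keys if k not in ordered)
--     return ordered
-- ===== SOURCE B (Python) =====
-- from typing import Any, Dict, List, Sequence
--
--
-- def _select_assignment_categories_fields(
--     rows: Sequence[Dict[str, Any]],
-- ) -> List[str]:
--     if not rows:
--         return []
--
--     preferred_order = [
--         "id",
--         "category_code",
--         "name",
--         "short_name",
--         "description",
--         "grading_scale_id",
--         "grading_scale_name",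
--         "weight",
--         "drop_lowest_count",
--         "is_default",
--         "is_active",
--         "school_id",
--         "school_name",
--         "created_at",
--         "updated_at",
--     ]
--
--     rank = {name: i for i, name in enumerate(preferred_order)}
--     keys = list(dict.fromkeys(k for r in rows for k in r))
--     return sorted(keys, key=lambda k: rank.get(k, len(preferred_order)))
-- ===== Notes on version B (the rewrite author's own statement) =====
-- stated objective: faster
-- what changed: Replaces the quadratic membership-scan dedup and the two filter/extend passes (each testing membership by scanning a list) with dict.fromkeys dedup plus one stable sort keyed by a precomputed rank dictionary (unknown keys get the sentinel rank len(preferred_order)).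
import Mathlib
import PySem

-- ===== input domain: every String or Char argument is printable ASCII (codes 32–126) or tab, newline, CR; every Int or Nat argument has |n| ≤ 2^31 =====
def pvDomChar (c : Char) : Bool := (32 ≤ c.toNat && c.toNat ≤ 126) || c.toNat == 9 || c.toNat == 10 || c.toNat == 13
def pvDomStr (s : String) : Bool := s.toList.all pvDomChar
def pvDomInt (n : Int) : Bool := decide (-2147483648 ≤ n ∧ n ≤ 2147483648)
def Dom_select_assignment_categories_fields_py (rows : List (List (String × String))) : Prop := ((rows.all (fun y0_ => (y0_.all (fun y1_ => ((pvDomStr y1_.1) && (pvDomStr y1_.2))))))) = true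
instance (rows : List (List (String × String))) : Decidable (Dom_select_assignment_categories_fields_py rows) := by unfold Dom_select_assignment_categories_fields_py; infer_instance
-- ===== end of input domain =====

-- B replaces A's quadratic membership-scan dedup and two filter/extend passes by an
-- ordered dict.fromkeys dedup plus one stable sort keyed by a precomputed rank table (idiomatic).


-- the literal preferred-column list, shared by both ports (the same constant in both Pythons)
def preferredOrder : List String :=
  ["id", "category_code", "name", "short_name", "description", "grading_scale_id",
   "grading_scale_name", "weight", "drop_lowest_count", "is_default", "is_active",
   "school_id", "school_name", "created_at", "updated_at"]

-- ===== PORT A =====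
def select_assignment_categories_fields_py (rows : List (List (String × String))) : List String :=
  if rows = [] then []
  else
    let preferred_order := preferredOrder
    let all_keys : List String :=
      rows.foldl (fun acc r =>
        r.foldl (fun acc2 kv => if acc2.contains kv.1 then acc2 else acc2 ++ [kv.1]) acc) []
    let ordered := preferred_order.filter (fun k => all_keys.contains k)
    -- ordered.extend(k for k in all_keys if k not in ordered): the generator tests membership
    -- in the list being extended, so the fold threads the growing list through the test.
    all_keys.foldl (fun acc k => if acc.contains k then acc else acc ++ [k]) ordered

-- ===== PORT B =====
def select_assignment_categories_fields_py_alt (rows : List (List (String × String))) : List String :=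
  if rows = [] then []
  else
    let preferred_order := preferredOrder
    let rank : PySem.Dict String Int :=
      (PySem.List.enumerate preferred_order 0).foldl (fun d p => d.insert p.2 p.1) PySem.Dict.empty
    let keys := PySem.List.dedup (rows.flatMap (fun r => r.map (fun kv => kv.1)))
    PySem.List.sorted keys (fun k => rank.getD k (preferred_order.length : Int)) false

-- ===== PRECONDITION & SPEC =====
def Spec_select_assignment_categories_fields_py (rows : List (List (String × String))) (out : List String) : Prop := out = select_assignment_categories_fields_py_alt rows
instance (rows : List (List (String × String))) (out : List String) : Decidable (Spec_select_assignment_categories_fields_py rows out) := by unfold Spec_select_assignment_categories_fields_py; infer_instance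

-- ===== CLAIM (what is proved, stated in full; the proofs are below) =====
def Claim_equal_select_assignment_categories_fields_py : Prop := ∀ (rows : List (List (String × String))), Dom_select_assignment_categories_fields_py rows → Spec_select_assignment_categories_fields_py rows (select_assignment_categories_fields_py rows)

-- ===== LEMMAS AND PROOFS =====

-- B's rank table and key function, named for the proofs
def rkD : PySem.Dict String Int :=
  (PySem.List.enumerate preferredOrder 0).foldl (fun d p => d.insert p.2 p.1) PySem.Dict.empty

def rk (k : String) : Int := rkD.getD k 15

lemma rk_lt_of_mem : ∀ y ∈ preferredOrder, rk y < 15 := by decide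

lemma rk_eq_of_not_mem (y : String) (h : y ∉ preferredOrder) : rk y = 15 := by
  have hkeys : rkD.keys = preferredOrder := by decide
  have hk : y ∉ rkD.keys := by rw [hkeys]; exact h
  unfold rk PySem.Dict.getD
  rw [(PySem.Dict.get?_eq_none_iff_not_mem_keys rkD y).mpr hk]
  rfl

lemma rk_le (y : String) : rk y ≤ 15 := by
  by_cases h : y ∈ preferredOrder
  · exact le_of_lt (rk_lt_of_mem y h)
  · exact le_of_eq (rk_eq_of_not_mem y h)

lemma rk_pairwise : preferredOrder.Pairwise (fun a b => rk a < rk b) := by decide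

-- insertBy puts x in front when it precedes every element
lemma insertBy_front {α : Type} (pred : α → α → Bool) (x : α) (ys : List α)
    (h : ∀ y ∈ ys, pred x y = true) : PySem.List.insertBy pred x ys = x :: ys := by
  cases ys with
  | nil => rfl
  | cons y t => simp [PySem.List.insertBy, h y (by simp)]

-- insertBy never crosses a suffix that x precedes entirely ... it stays in the prefix
lemma insertBy_append {α : Type} (pred : α → α → Bool) (x : α) (A B : List α)
    (h : ∀ b ∈ B, pred x b = true) :
    PySem.List.insertBy pred x (A ++ B) = PySem.List.insertBy pred x A ++ B := by
  induction A with
  | nil =>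
    cases B with
    | nil => rfl
    | cons b t => simp [PySem.List.insertBy, h b (by simp)]
  | cons a A' ih =>
    cases hp : pred x a <;> simp [PySem.List.insertBy, hp, ih]

-- inserting x ∈ q into a filter of q (strictly increasing under rk) lands it at its q-position
lemma insert_filter (q : List String) (l : List String) (x : String)
    (hq : q.Pairwise (fun a b => rk a < rk b)) (hx : x ∈ q) (hxl : x ∉ l) :
    PySem.List.insertBy (fun a b => decide (rk a < rk b)) x (q.filter (fun p => decide (p ∈ l)))
      = q.filter (fun p => decide (p ∈ l ∨ p = x)) := by
  induction q with
  | nil => cases hx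
  | cons p q' ih =>
    rw [List.pairwise_cons] at hq
    obtain ⟨hpq, hq'⟩ := hq
    rcases List.mem_cons.mp hx with rfl | hx'
    · have hxq' : ∀ y ∈ q', y ≠ x := by
        intro y hy he
        exact absurd (hpq y hy) (by rw [he]; exact lt_irrefl _)
      have h1 : q'.filter (fun p => decide (p ∈ l ∨ p = x)) = q'.filter (fun p => decide (p ∈ l)) :=
        List.filter_congr (by intro y hy; simp [hxq' y hy])
      have hfront : ∀ y ∈ q'.filter (fun p => decide (p ∈ l)), decide (rk x < rk y) = true := by
        intro y hy
        have := hpq y (List.mem_of_mem_filter hy)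
        simpa using this
      simp only [List.filter_cons, decide_eq_true_eq]
      rw [if_neg (by simpa using hxl), if_pos (by simp), h1]
      exact insertBy_front _ _ _ hfront
    · have hpx : p ≠ x := by
        intro he
        exact absurd (hpq x hx') (by rw [he]; exact lt_irrefl _)
      simp only [List.filter_cons, decide_eq_true_eq]
      by_cases hpl : p ∈ l
      · rw [if_pos hpl, if_pos (Or.inl hpl)]
        have hnp : decide (rk x < rk p) = false := by
          simpa using not_lt_of_gt (hpq x hx')
        simp only [PySem.List.insertBy, hnp, Bool.false_eq_true, if_false]
        rw [ih hq' hx']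
      · rw [if_neg hpl, if_neg (by rintro (h | rfl); exact hpl h; exact hpx rfl)]
        exact ih hq' hx'

-- A's "append if not member" fold on a duplicate-free list is append-filter
lemma foldl_add_eq_append (l : List String) : ∀ (s : List String), l.Nodup →
    l.foldl (fun acc k => if acc.contains k then acc else acc ++ [k]) s
      = s ++ l.filter (fun k => !s.contains k) := by
  induction l with
  | nil => intro s _; simp
  | cons x l' ih =>
    intro s hnd
    rw [List.nodup_cons] at hnd
    obtain ⟨hx, hnd'⟩ := hnd
    cases hc : s.contains x with
    | true =>
      simp only [List.foldl_cons, if_true, List.filter_cons, hc, Bool.not_true,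
        Bool.false_eq_true, if_false]
      exact ih s hnd'
    | false =>
      simp only [List.foldl_cons, Bool.false_eq_true, if_false, List.filter_cons, hc,
        Bool.not_false, if_true]
      rw [ih (s ++ [x]) hnd']
      have : l'.filter (fun k => !(s ++ [x]).contains k) = l'.filter (fun k => !s.contains k) := by
        apply List.filter_congr
        intro y hy
        have hne : x ≠ y := fun he => hx (he ▸ hy)
        simp only [List.contains_append, Bool.not_or]
        simp
        exact fun _ he => hne he.symm
      rw [this]
      simp

-- the nested key-collection fold over rows is the fold over the flattened key list
lemma foldl_rows (rows : List (List (String × String))) (g : List String → String → List String) :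
    ∀ s, rows.foldl (fun acc r => r.foldl (fun a kv => g a kv.1) acc) s
      = (rows.flatMap (fun r => r.map (fun kv => kv.1))).foldl g s := by
  induction rows with
  | nil => intro s; rfl
  | cons r rest ih =>
    intro s
    simp only [List.foldl_cons, List.flatMap_cons, List.foldl_append, List.foldl_map]
    exact ih _

lemma foldl_step_eq_dedup (l : List String) :
    l.foldl (fun acc k => if acc.contains k then acc else acc ++ [k]) [] = PySem.List.dedup l := by
  rw [PySem.List.dedup_eq_ofList, PySem.Set.ofList_eq_foldl]
  rfl

-- the stable sort by rank, on a duplicate-free list, is "preferred-present first, rest after"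
lemma sorted_rk (l : List String) (hnd : l.Nodup) :
    PySem.List.sorted l rk false
      = preferredOrder.filter (fun p => decide (p ∈ l))
        ++ l.filter (fun k => decide (k ∉ preferredOrder)) := by
  induction l using List.reverseRecOn with
  | nil => simp [PySem.List.sorted]
  | append_singleton l x ih =>
    rw [List.nodup_append] at hnd
    obtain ⟨hl, -, hdisj⟩ := hnd
    have hxl : x ∉ l := fun hmem => hdisj x hmem x (by simp) rfl
    rw [PySem.List.sorted_eq_foldl_insertBy, List.foldl_append, List.foldl_cons, List.foldl_nil,
      ← PySem.List.sorted_eq_foldl_insertBy, ih hl]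
    by_cases hxP : x ∈ preferredOrder
    · have hB : ∀ b ∈ l.filter (fun k => decide (k ∉ preferredOrder)),
          (fun a b => decide (rk a < rk b)) x b = true := by
        intro b hb
        have hbP : b ∉ preferredOrder := by
          have := List.of_mem_filter hb
          simpa using this
        have h1 := rk_eq_of_not_mem b hbP
        have h2 := rk_lt_of_mem x hxP
        simp only [decide_eq_true_eq]
        omega
      rw [insertBy_append _ _ _ _ hB, insert_filter preferredOrder l x rk_pairwise hxP hxl]
      congr 1
      · apply List.filter_congr
        intro p _
        simp [List.mem_append]
      · simp [List.filter_append, hxP]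
    · have hall : ∀ y ∈ preferredOrder.filter (fun p => decide (p ∈ l))
            ++ l.filter (fun k => decide (k ∉ preferredOrder)),
          (fun a b => decide (rk a < rk b)) x y = false := by
        intro y _
        have h1 := rk_eq_of_not_mem x hxP
        have h2 := rk_le y
        simp only [decide_eq_false_iff_not, not_lt]
        omega
      rw [PySem.List.insertBy_of_forall_not_before _ _ _ hall]
      have h1 : preferredOrder.filter (fun p => decide (p ∈ l ++ [x]))
          = preferredOrder.filter (fun p => decide (p ∈ l)) := by
        apply List.filter_congr
        intro p hp
        have : p ≠ x := fun he => hxP (he ▸ hp)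
        simp [List.mem_append, this]
      rw [h1]
      simp [List.filter_append, hxP]

-- ===== VERDICT (by name: the statement is the Claim_ definition above) =====
theorem select_assignment_categories_fields_py_spec : Claim_equal_select_assignment_categories_fields_py := by
  intro rows _
  unfold Spec_select_assignment_categories_fields_py select_assignment_categories_fields_py
    select_assignment_categories_fields_py_alt
  by_cases h : rows = []
  · simp [h]
  · simp only [if_neg h]
    rw [foldl_rows rows (fun acc k => if acc.contains k then acc else acc ++ [k]), foldl_step_eq_dedup]
    set dk := PySem.List.dedup (rows.flatMap (fun r => r.map (fun kv => kv.1))) with hdk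
    have hnd : dk.Nodup := PySem.List.nodup_dedup _
    have hsorted : PySem.List.sorted dk (fun k => rkD.getD k (preferredOrder.length : Int)) false
        = PySem.List.sorted dk rk false := rfl
    rw [foldl_add_eq_append dk _ hnd]
    show _ = PySem.List.sorted dk (fun k => rkD.getD k (preferredOrder.length : Int)) false
    rw [hsorted, sorted_rk dk hnd]
    congr 1
    · apply List.filter_congr
      intro p _
      simp
    · apply List.filter_congr
      intro k hk
      by_cases hkP : k ∈ preferredOrder
      · simp [List.mem_filter, hkP, hk]
      · simp [List.mem_filter, hkP]
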